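-- pv_equiv track=rewrite | github.com/ajhofmann/PyEuler | Problems 30-39/Problem 38.py | unique_digits_no_zero
-- ===== SOURCE A (Python) =====
-- def unique_digits_no_zero(num):
--     num_chars = {}
--     for j in range(len(num)):
--         num_chars[num[j]] = 0
--         if num[j] == '0':
--             return False
--     if len(num_chars) == len(num):
--         return True
--     else: return False
-- ===== SOURCE B (Python) =====
-- def unique_digits_no_zero(num):
--     s = sorted(num)
--     prev = None
--     for ch in s:
--         if ch == '0':
--             return False
--         if ch == prev:
--             return False
--         prev = ch
--     return True
-- ===== Notes on version B (the rewrite author's own statement) =====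
-- stated objective: alternative
-- what changed: B sorts the characters and detects duplicates by comparing each character with its predecessor in one adjacent-pair pass, instead of A's dict-building loop compared by size against the string length.
import Mathlib
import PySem

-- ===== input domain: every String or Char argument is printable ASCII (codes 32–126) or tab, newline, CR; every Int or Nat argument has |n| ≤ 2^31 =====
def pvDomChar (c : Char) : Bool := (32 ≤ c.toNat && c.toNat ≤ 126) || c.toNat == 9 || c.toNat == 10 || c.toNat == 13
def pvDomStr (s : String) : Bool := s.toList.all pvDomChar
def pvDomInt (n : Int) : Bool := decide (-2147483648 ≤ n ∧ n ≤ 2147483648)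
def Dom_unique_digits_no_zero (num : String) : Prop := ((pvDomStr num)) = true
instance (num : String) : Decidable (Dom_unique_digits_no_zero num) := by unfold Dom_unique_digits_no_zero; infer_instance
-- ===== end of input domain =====

-- B replaces A's dict-building loop (compared by size against len(num)) with sort + one
-- adjacent-pair scan; alternative decomposition, not claimed faster.

-- ===== PORT A =====
-- the 'for j in range(len(num))' loop: insert num[j] into the dict, early-return False on '0'
-- (none = the early 'return False' was taken)
def udnzLoopA : List Char → PySem.Dict Char Int → Option (PySem.Dict Char Int)
  | [], d => some d
  | c :: rest, d =>
    let d' := d.insert c 0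
    if c == '0' then none else udnzLoopA rest d'

def unique_digits_no_zero (num : String) : Bool :=
  match udnzLoopA num.toList PySem.Dict.empty with
  | none => false
  | some d => if d.size = num.toList.length then true else false

-- ===== PORT B =====
-- the 'for ch in s' loop of Source B, carrying prev : Option Char (None at the start)
def udnzScanB (prev : Option Char) : List Char → Bool
  | [] => true
  | c :: rest =>
    if c == '0' then false
    else if (match prev with | some p => c == p | none => false) then false
    else udnzScanB (some c) rest

def unique_digits_no_zero_alt (num : String) : Bool :=
  udnzScanB none (PySem.List.sorted num.toList (fun x => x) false)

-- ===== PRECONDITION & SPEC =====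
def Spec_unique_digits_no_zero (num : String) (out : Bool) : Prop := out = unique_digits_no_zero_alt num
instance (num : String) (out : Bool) : Decidable (Spec_unique_digits_no_zero num out) := by unfold Spec_unique_digits_no_zero; infer_instance

-- ===== CLAIM (what is proved, stated in full; the proofs are below) =====
def Claim_equal_unique_digits_no_zero : Prop := ∀ (num : String), Dom_unique_digits_no_zero num → Spec_unique_digits_no_zero num (unique_digits_no_zero num)

-- ===== LEMMAS AND PROOFS =====

lemma udnzLoopA_of_mem (l : List Char) (d : PySem.Dict Char Int) (h : '0' ∈ l) :
    udnzLoopA l d = none := by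
  induction l generalizing d with
  | nil => simp at h
  | cons c rest ih =>
    simp only [udnzLoopA]
    by_cases hc : c = '0'
    · simp [hc]
    · have : '0' ∈ rest := by
        rcases List.mem_cons.mp h with h' | h'
        · exact absurd h'.symm hc
        · exact h'
      simp [hc, ih _ this]

lemma udnzLoopA_of_not_mem (l : List Char) (d : PySem.Dict Char Int) (h : '0' ∉ l) :
    udnzLoopA l d = some (l.foldl (fun d c => d.insert c 0) d) := by
  induction l generalizing d with
  | nil => simp [udnzLoopA]
  | cons c rest ih =>
    have hc : c ≠ '0' := fun hc => h (hc ▸ List.mem_cons_self)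
    have hr : '0' ∉ rest := fun hr => h (List.mem_cons_of_mem _ hr)
    simp [udnzLoopA, hc, ih _ hr]

lemma size_foldl_insert (l : List Char) :
    (l.foldl (fun (d : PySem.Dict Char Int) c => d.insert c 0) PySem.Dict.empty).size
      = (PySem.Set.ofList l).length := by
  have hk := PySem.Dict.keys_foldl_insert (ν := Int) l (fun _ _ => 0) PySem.Dict.empty
  have hsz : ∀ d : PySem.Dict Char Int, d.size = d.keys.length := by
    intro d; simp [PySem.Dict.size, PySem.Dict.keys]
  rw [hsz, hk]
  simp [PySem.Set.update, PySem.Dict.keys_empty, PySem.Set.ofList_eq_foldl]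

lemma length_ofList_lt_of_not_nodup (l : List Char) (h : ¬ l.Nodup) :
    (PySem.Set.ofList l).length < l.length := by
  induction l with
  | nil => simp at h
  | cons x xs ih =>
    rw [PySem.Set.ofList_cons]
    by_cases hx : x ∈ xs
    · have hmem : x ∈ PySem.Set.ofList xs := (PySem.Set.mem_ofList xs x).mpr hx
      have hlt : ((PySem.Set.ofList xs).discard x).length < (PySem.Set.ofList xs).length := by
        rw [PySem.Set.discard.eq_1]
        exact List.length_filter_lt_length_iff_exists.mpr ⟨x, hmem, by simp⟩
      have := PySem.Set.length_ofList_le xs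
      simp only [List.length_cons]
      omega
    · have hns : ¬ xs.Nodup := by
        simp only [List.nodup_cons, hx, not_false_iff, true_and] at h
        exact h
      have := ih hns
      have hle : ((PySem.Set.ofList xs).discard x).length ≤ (PySem.Set.ofList xs).length := by
        rw [PySem.Set.discard.eq_1]; exact List.length_filter_le _ _
      simp only [List.length_cons]
      omega

lemma length_ofList_eq_iff (l : List Char) :
    (PySem.Set.ofList l).length = l.length ↔ l.Nodup := by
  constructor
  · intro h
    by_contra hn
    exact absurd h (Nat.ne_of_lt (length_ofList_lt_of_not_nodup l hn))
  · intro h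
    rw [PySem.Set.ofList_eq_self_of_nodup l h]

-- A returns: False if '0' occurs, else whether all characters are distinct
lemma unique_digits_no_zero_eq (num : String) :
    unique_digits_no_zero num
      = if '0' ∈ num.toList then false else decide num.toList.Nodup := by
  unfold unique_digits_no_zero
  by_cases h : '0' ∈ num.toList
  · rw [udnzLoopA_of_mem _ _ h]; simp [h]
  · rw [udnzLoopA_of_not_mem _ _ h]
    simp only [h, if_false]
    rw [size_foldl_insert]
    by_cases hn : num.toList.Nodup
    · rw [if_pos ((length_ofList_eq_iff num.toList).mpr hn)]
      simp [hn]
    · rw [if_neg (fun he => hn ((length_ofList_eq_iff num.toList).mp he))]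
      simp [hn]

-- the scan returns true iff: no '0', no equal adjacent pair, and the head differs from prev
lemma cons_rhs_iff (c : Char) (rest : List Char) (hc : c ≠ '0') :
    ('0' ∉ rest ∧ rest.IsChain (· ≠ ·) ∧ ∀ c', rest.head? = some c' → c' ≠ c) ↔
      ('0' ∉ (c :: rest) ∧ (c :: rest).IsChain (· ≠ ·)) := by
  rw [List.isChain_cons]
  simp only [List.mem_cons, not_or, Option.mem_def]
  constructor
  · rintro ⟨h0, hch, hhd⟩
    exact ⟨⟨fun h => hc h.symm, h0⟩, fun b hb => (hhd b hb).symm, hch⟩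
  · rintro ⟨⟨-, h0⟩, hhd, hch⟩
    exact ⟨h0, hch, fun b hb => (hhd b hb).symm⟩

-- the scan returns true iff: no '0', no equal adjacent pair, and the head differs from prev
lemma udnzScanB_eq_true_iff (s : List Char) : ∀ (prev : Option Char),
    udnzScanB prev s = true ↔
      ('0' ∉ s ∧ s.IsChain (· ≠ ·) ∧ ∀ p ∈ prev, ∀ c ∈ s.head?, c ≠ p) := by
  induction s with
  | nil => intro prev; simp [udnzScanB]
  | cons c rest ih =>
    intro prev
    by_cases hc : c = '0'
    · simp [udnzScanB, hc]
    · cases prev with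
      | none =>
        rw [show udnzScanB none (c :: rest) = udnzScanB (some c) rest by
              simp [udnzScanB, hc]]
        rw [ih (some c)]
        simp only [Option.mem_def, Option.some_inj, forall_eq', reduceCtorEq,
          false_implies, implies_true, and_true]
        exact cons_rhs_iff c rest hc
      | some p =>
        by_cases hcp : c = p
        · rw [show udnzScanB (some p) (c :: rest) = false by simp [udnzScanB, hcp]]
          constructor
          · intro h; simp at h
          · rintro ⟨-, -, hh⟩
            exact absurd (hh p (by simp) c (by simp)) (by simp [hcp])
        · rw [show udnzScanB (some p) (c :: rest) = udnzScanB (some c) rest by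
              simp [udnzScanB, hc, hcp]]
          rw [ih (some c)]
          simp only [Option.mem_def, Option.some_inj, forall_eq', List.head?_cons]
          constructor
          · rintro ⟨h0, hch, hhd⟩
            refine ⟨((cons_rhs_iff c rest hc).mp ⟨h0, hch, hhd⟩).1,
                    ((cons_rhs_iff c rest hc).mp ⟨h0, hch, hhd⟩).2,
                    hcp⟩
          · rintro ⟨h0, hch, -⟩
            exact (cons_rhs_iff c rest hc).mpr ⟨h0, hch⟩

lemma isChain_lt_of_le_ne : ∀ (s : List Char),
    s.IsChain (· ≤ ·) → s.IsChain (· ≠ ·) → s.IsChain (· < ·) := by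
  intro s
  induction s with
  | nil => simp
  | cons a t iht =>
    intro h1 h2
    cases t with
    | nil => simp
    | cons b t' =>
      rw [List.isChain_cons_cons] at *
      exact ⟨lt_of_le_of_ne h1.1 h2.1, iht h1.2 h2.2⟩

lemma isChain_ne_iff_nodup_of_sorted (s : List Char) (hs : s.Pairwise (· ≤ ·)) :
    s.IsChain (· ≠ ·) ↔ s.Nodup := by
  constructor
  · intro h2
    have h1 : s.IsChain (· ≤ ·) := hs.isChain
    have hc : s.IsChain (· < ·) := isChain_lt_of_le_ne s h1 h2
    exact (List.isChain_iff_pairwise.mp hc).imp (fun h => ne_of_lt h)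
  · intro h
    exact (List.Nodup.pairwise_of_forall_ne h (fun a _ b _ hab => hab)).isChain

-- B returns the same value
lemma unique_digits_no_zero_alt_eq (num : String) :
    unique_digits_no_zero_alt num
      = if '0' ∈ num.toList then false else decide num.toList.Nodup := by
  unfold unique_digits_no_zero_alt
  have hperm := PySem.List.sorted_perm num.toList (fun x : Char => x) false
  have hpw : (PySem.List.sorted num.toList (fun x : Char => x) false).Pairwise (· ≤ ·) :=
    PySem.List.sorted_pairwise num.toList (fun x => x)
  set s := PySem.List.sorted num.toList (fun x : Char => x) false with hs
  have hiff := udnzScanB_eq_true_iff s none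
  have hmem : '0' ∈ s ↔ '0' ∈ num.toList := hperm.mem_iff
  have hnd : s.Nodup ↔ num.toList.Nodup := hperm.nodup_iff
  by_cases h0 : '0' ∈ num.toList
  · simp only [h0, if_true]
    cases hb : udnzScanB none s
    · rfl
    · exact absurd (hmem.mpr h0) (hiff.mp hb).1
  · simp only [h0, if_false]
    by_cases hn : num.toList.Nodup
    · have : udnzScanB none s = true := hiff.mpr
        ⟨fun h => h0 (hmem.mp h),
         (isChain_ne_iff_nodup_of_sorted s hpw).mpr (hnd.mpr hn),
         by simp⟩
      simp [this, hn]
    · have : udnzScanB none s ≠ true := fun hb =>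
        hn (hnd.mp ((isChain_ne_iff_nodup_of_sorted s hpw).mp (hiff.mp hb).2.1))
      simp only [hn, decide_false]
      exact Bool.eq_false_iff.mpr this

-- ===== VERDICT (by name: the statement is the Claim_ definition above) =====
theorem unique_digits_no_zero_spec : Claim_equal_unique_digits_no_zero := by
  intro num _
  unfold Spec_unique_digits_no_zero
  rw [unique_digits_no_zero_eq, unique_digits_no_zero_alt_eq]
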